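-- pv_equiv track=rewrite | github.com/yuejoyceliu/scripts_for_lab | mergeOPTlog.py | outname
-- ===== SOURCE A (Python) =====
-- def outname(s1,s2):
-- #return the name of output file, should be the same part of name s1 and s2 plus 'merge.log'
--     s=''
--     for i in range(min(len(s1),len(s2))):
--         if s1[i]==s2[i]:
--             s += s1[i]
--         else:
--             break
--     s = s+'merge.log'
--     return s
-- ===== SOURCE B (Python) =====
-- def outname(s1, s2):
--     # boundary-finding: index of first mismatch (default: min length), then one slice
--     n = min(len(s1), len(s2))
--     i = next((k for k in range(n) if s1[k] != s2[k]), n)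
--     return s1[:i] + 'merge.log'
-- ===== Notes on version B (the rewrite author's own statement) =====
-- stated objective: simpler
-- what changed: Replaces the character-accumulating loop with a boundary-finding step (index of first mismatch via next() over a generator, defaulting to the min length) followed by a single slice plus the suffix. (single slice avoids per-character string concatenation)
import Mathlib
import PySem

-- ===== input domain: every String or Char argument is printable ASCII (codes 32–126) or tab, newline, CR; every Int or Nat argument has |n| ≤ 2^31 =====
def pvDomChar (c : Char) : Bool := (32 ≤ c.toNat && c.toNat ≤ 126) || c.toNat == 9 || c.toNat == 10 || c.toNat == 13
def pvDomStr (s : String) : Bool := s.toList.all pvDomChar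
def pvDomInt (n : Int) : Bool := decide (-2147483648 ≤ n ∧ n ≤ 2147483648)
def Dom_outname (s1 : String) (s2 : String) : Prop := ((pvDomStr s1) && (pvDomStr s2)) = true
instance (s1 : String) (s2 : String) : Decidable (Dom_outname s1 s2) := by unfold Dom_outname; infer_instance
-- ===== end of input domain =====

-- B replaces A's character-accumulating loop by a first-mismatch index search plus one slice (simpler decomposition, same cost).


-- ===== PORT A =====
-- A's for-loop over range(min(len,len)) with break, accumulating matched chars in s.
-- s1[i]/s2[i] with 0 ≤ i < length are exact as getElem! here (never raise).
def outnameGo (c1 c2 : List Char) (n : Nat) (i : Nat) (s : List Char) : List Char :=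
  if _h : i < n then
    if c1[i]! = c2[i]! then outnameGo c1 c2 n (i + 1) (s ++ [c1[i]!]) else s
  else s
termination_by n - i

def outname (s1 : String) (s2 : String) : String :=
  String.mk (outnameGo s1.toList s2.toList (min s1.toList.length s2.toList.length) 0 []
             ++ ("merge.log").toList)

-- ===== PORT B =====
-- index of first mismatch (find? over range, default n), then a single take/slice
def outname_alt (s1 : String) (s2 : String) : String :=
  let c1 := s1.toList
  let c2 := s2.toList
  let n := min c1.length c2.length
  let i := ((List.range n).find? (fun k => !(c1[k]! == c2[k]!))).getD n
  String.mk (c1.take i ++ ("merge.log").toList)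

-- ===== PRECONDITION & SPEC =====
def Spec_outname (s1 : String) (s2 : String) (out : String) : Prop := out = outname_alt s1 s2
instance (s1 : String) (s2 : String) (out : String) : Decidable (Spec_outname s1 s2 out) := by unfold Spec_outname; infer_instance

-- ===== CLAIM (what is proved, stated in full; the proofs are below) =====
def Claim_equal_outname : Prop := ∀ (s1 : String) (s2 : String), Dom_outname s1 s2 → Spec_outname s1 s2 (outname s1 s2)

-- ===== LEMMAS AND PROOFS =====

/-- common prefix, structural reference implementation -/
def cp : List Char → List Char → List Char
  | a :: as, b :: bs => if a = b then a :: cp as bs else []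
  | _, _ => []

theorem cp_nil_left (l : List Char) : cp [] l = [] := by cases l <;> rfl
theorem cp_nil_right (l : List Char) : cp l [] = [] := by cases l <;> rfl

theorem outnameGo_eq_cp (c1 c2 : List Char) (i : Nat) (acc : List Char) :
    outnameGo c1 c2 (min c1.length c2.length) i acc = acc ++ cp (c1.drop i) (c2.drop i) := by
  generalize hk : min c1.length c2.length - i = k
  induction k generalizing i acc with
  | zero =>
      have h : ¬ i < min c1.length c2.length := by omega
      rw [outnameGo, dif_neg h]
      rcases Nat.min_le_left c1.length c2.length |>.lt_or_eq with _ | _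
      all_goals {
        rcases Nat.lt_or_ge i c1.length with h1 | h1
        · have h2 : c2.length ≤ i := by omega
          rw [List.drop_eq_nil_of_le h2, cp_nil_right, List.append_nil]
        · rw [List.drop_eq_nil_of_le h1, cp_nil_left, List.append_nil] }
  | succ k ih =>
      have h : i < min c1.length c2.length := by omega
      have h1 : i < c1.length := lt_of_lt_of_le h (Nat.min_le_left _ _)
      have h2 : i < c2.length := lt_of_lt_of_le h (Nat.min_le_right _ _)
      rw [outnameGo, dif_pos h, List.drop_eq_getElem_cons h1, List.drop_eq_getElem_cons h2,
          getElem!_pos c1 i h1, getElem!_pos c2 i h2]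
      by_cases he : c1[i] = c2[i]
      · rw [if_pos he, cp, if_pos he, ih (i + 1) _ (by omega), List.append_assoc]
        rfl
      · rw [if_neg he, cp, if_neg he, List.append_nil]

/-- B's first-mismatch index is the length of the common prefix. -/
theorem find_eq_cp_length (c1 c2 : List Char) :
    (((List.range (min c1.length c2.length)).find?
        (fun k => !(c1[k]! == c2[k]!))).getD (min c1.length c2.length))
      = (cp c1 c2).length := by
  induction c1 generalizing c2 with
  | nil => simp [cp_nil_left]
  | cons a as ih =>
      cases c2 with
      | nil => simp [cp_nil_right]
      | cons b bs =>
          rw [List.length_cons, List.length_cons, Nat.succ_min_succ,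
              List.range_succ_eq_map, List.find?_cons]
          by_cases hab : a = b
          · have hp : (!((a :: as)[0]! == (b :: bs)[0]!)) = false := by
              simp [hab]
            rw [hp, List.find?_map]
            have hfun : ((fun k => !((a :: as)[k]! == (b :: bs)[k]!)) ∘ Nat.succ)
                = (fun k => !(as[k]! == bs[k]!)) := by
              funext k
              simp [Function.comp]
            rw [hfun]
            cases hfo : (List.range (min as.length bs.length)).find?
                (fun k => !(as[k]! == bs[k]!)) with
            | none =>
                have := ih bs
                rw [hfo] at this
                simp only [Option.map_none, Option.getD_none] at this ⊢
                rw [cp, if_pos hab, List.length_cons, ← this]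
            | some j =>
                have := ih bs
                rw [hfo] at this
                simp only [Option.map_some, Option.getD_some] at this ⊢
                rw [cp, if_pos hab, List.length_cons, ← this]
          · have hp : (!((a :: as)[0]! == (b :: bs)[0]!)) = true := by
              simp [hab]
            rw [hp]
            simp [cp, hab]

theorem cp_take (c1 c2 : List Char) : c1.take (cp c1 c2).length = cp c1 c2 := by
  induction c1 generalizing c2 with
  | nil => simp [cp_nil_left]
  | cons a as ih =>
      cases c2 with
      | nil => simp [cp_nil_right]
      | cons b bs =>
          rw [cp]
          by_cases hab : a = b
          · rw [if_pos hab, List.length_cons, List.take_succ_cons, ih bs]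
          · rw [if_neg hab]
            simp

-- ===== VERDICT (by name: the statement is the Claim_ definition above) =====
theorem outname_spec : Claim_equal_outname := by
  intro s1 s2 _
  unfold Spec_outname outname outname_alt
  simp only []
  rw [outnameGo_eq_cp, find_eq_cp_length, cp_take]
  simp
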